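-- pv_equiv track=rewrite | github.com/JohnnyCobzari/AA-Tournament | cobzari_ion_payforforgiveness_round_2.py | strategy_round_2
-- ===== SOURCE A (Python) =====
-- def strategy_round_2(opponent_id: int, my_history: dict[int, list[int]], opponents_history: dict[int, list[int]]) -> tuple[int, int]:
--     current_round = len(my_history.get(opponent_id, []))
--     if current_round == 0:
--         move = 1
--     else:
--         cycle_position = current_round % 10
--         if cycle_position == 0:
--             cycle_position = 10
--         recent_window = opponents_history[opponent_id][-cycle_position:]
--         betrayals = recent_window.count(0)
--         move = 0 if betrayals >= 2 else 1
--
--     available_opponents = [op for op in my_history if len(my_history[op]) < 200]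
--
--
--     if not available_opponents:
--         return move, opponent_id
--
--
--     if opponents_history[opponent_id] and (opponents_history[opponent_id][-1] == 0 or len(my_history[opponent_id]) >= 200):
--
--         available_opponents.sort(key=lambda x: (len(my_history[x]), x))
--         next_opponent = available_opponents[0]
--         return move, next_opponent
--
--
--     return move, opponent_id
-- ===== SOURCE B (Python) =====
-- def strategy_round_2(opponent_id: int, my_history: dict[int, list[int]], opponents_history: dict[int, list[int]]) -> tuple[int, int]:
--     mine = my_history.get(opponent_id, [])
--     if not mine:
--         move = 1
--     else:
--         w = len(mine) % 10 or 10
--         move = 0 if opponents_history[opponent_id][-w:].count(0) >= 2 else 1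
--     # single scan for the least-played available opponent (key (games, id) is totally ordered)
--     best = None
--     for op, hist in my_history.items():
--         if len(hist) < 200:
--             key = (len(hist), op)
--             if best is None or key < best:
--                 best = key
--     if best is None:
--         return move, opponent_id
--     opp = opponents_history[opponent_id]
--     if opp and (opp[-1] == 0 or len(mine) >= 200):
--         return move, best[1]
--     return move, opponent_id
-- ===== Notes on version B (the rewrite author's own statement) =====
-- stated objective: faster
-- what changed: The next-opponent pick no longer builds the available list and fully sorts it by (games, id) before taking element 0; B keeps a running lexicographic minimum (games_played, opponent_id) in a single scan over my_history.items(), while the move-selection logic is unchanged.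
import Mathlib
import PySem

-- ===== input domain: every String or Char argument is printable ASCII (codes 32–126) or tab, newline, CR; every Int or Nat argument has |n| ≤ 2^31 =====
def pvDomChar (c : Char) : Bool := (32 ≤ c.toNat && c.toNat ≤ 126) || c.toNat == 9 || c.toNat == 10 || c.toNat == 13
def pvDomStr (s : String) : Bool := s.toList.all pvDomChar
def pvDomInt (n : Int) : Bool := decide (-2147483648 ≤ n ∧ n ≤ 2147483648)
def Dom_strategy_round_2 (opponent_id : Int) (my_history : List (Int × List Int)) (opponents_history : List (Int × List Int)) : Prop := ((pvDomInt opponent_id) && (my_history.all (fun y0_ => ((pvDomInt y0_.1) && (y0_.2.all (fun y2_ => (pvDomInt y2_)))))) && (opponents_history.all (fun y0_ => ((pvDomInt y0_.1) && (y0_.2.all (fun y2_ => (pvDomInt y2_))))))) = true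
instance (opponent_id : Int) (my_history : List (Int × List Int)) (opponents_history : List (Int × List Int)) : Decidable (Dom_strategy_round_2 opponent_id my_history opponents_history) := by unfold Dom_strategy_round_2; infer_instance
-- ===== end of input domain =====

-- B replaces A's build-filter-sort-take-head(O(n log n)) pick of the next opponent by a single
-- fold over the history items keeping the lexicographically least (games, id) key; the move logic is unchanged.

-- ===== PORT A =====
def strategy_round_2 (opponent_id : Int) (my_history : List (Int × List Int)) (opponents_history : List (Int × List Int)) : Int × Int :=
  let md : PySem.Dict Int (List Int) := PySem.Dict.mk my_history
  let od : PySem.Dict Int (List Int) := PySem.Dict.mk opponents_history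
  let current_round : Int := PySem.List.len (md.getD opponent_id [])
  let move : Int :=
    if current_round = 0 then 1
    else
      let cycle_position := PySem.Int.mod current_round 10
      let cycle_position := if cycle_position = 0 then 10 else cycle_position
      -- opponents_history[opponent_id]: Pre_ guarantees the key is present where this line is reached
      let recent_window := PySem.List.slice (od.getD opponent_id []) (some (-cycle_position)) none
      let betrayals : Nat := PySem.List.count recent_window 0
      if 2 ≤ betrayals then 0 else 1
  let available_opponents : List Int :=
    (PySem.Dict.keys md).filter (fun op => decide (PySem.List.len (md.getD op []) < 200))
  if available_opponents = [] then (move, opponent_id)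
  else
    if (od.getD opponent_id []) ≠ [] ∧
        (PySem.List.pyGetD (od.getD opponent_id []) (-1) 0 = 0 ∨
          200 ≤ PySem.List.len (md.getD opponent_id [])) then
      -- sort(key=lambda x: (len(my_history[x]), x)) then take [0]
      let sortedl := PySem.List.sorted2 available_opponents
        (fun x => PySem.List.len (md.getD x [])) (fun x => x)
      let next_opponent := PySem.List.pyGetD sortedl 0 0
      (move, next_opponent)
    else (move, opponent_id)

-- ===== PORT B =====
def strategy_round_2_alt (opponent_id : Int) (my_history : List (Int × List Int)) (opponents_history : List (Int × List Int)) : Int × Int :=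
  let md : PySem.Dict Int (List Int) := PySem.Dict.mk my_history
  let od : PySem.Dict Int (List Int) := PySem.Dict.mk opponents_history
  let mine := md.getD opponent_id []
  let move : Int :=
    if mine = [] then 1
    else
      let w0 := PySem.Int.mod (PySem.List.len mine) 10
      let w := if w0 = 0 then 10 else w0          -- `len(mine) % 10 or 10`
      if 2 ≤ PySem.List.count (PySem.List.slice (od.getD opponent_id []) (some (-w)) none) 0
      then 0 else 1
  -- single scan: `for op, hist in my_history.items(): ...` keeping the least (len(hist), op);
  -- Python's tuple `<` is lexicographic, spelled out componentwise here
  let best : Option (Int × Int) := md.items.foldl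
    (fun b p =>
      if PySem.List.len p.2 < 200 then
        match b with
        | none => some (PySem.List.len p.2, p.1)
        | some b0 =>
          if PySem.List.len p.2 < b0.1 ∨ (PySem.List.len p.2 = b0.1 ∧ p.1 < b0.2) then
            some (PySem.List.len p.2, p.1)
          else some b0
      else b) none
  match best with
  | none => (move, opponent_id)
  | some b0 =>
    if (od.getD opponent_id []) ≠ [] ∧
        (PySem.List.pyGetD (od.getD opponent_id []) (-1) 0 = 0 ∨
          200 ≤ PySem.List.len mine) then
      (move, b0.2)
    else (move, opponent_id)

-- ===== PRECONDITION & SPEC =====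
-- Pre_ requires distinct keys in each association list (a Python dict cannot carry duplicate keys)
-- and excludes exactly the inputs on which A raises KeyError (opponent_id missing from a dict it indexes).
def Pre_strategy_round_2 (opponent_id : Int) (my_history : List (Int × List Int)) (opponents_history : List (Int × List Int)) : Prop :=
  let md : PySem.Dict Int (List Int) := PySem.Dict.mk my_history
  let od : PySem.Dict Int (List Int) := PySem.Dict.mk opponents_history
  let availEmpty := md.keys.all (fun k => !decide (PySem.List.len (md.getD k []) < 200))
  (my_history.map Prod.fst).Nodup ∧ (opponents_history.map Prod.fst).Nodup ∧
  (od.contains opponent_id = true →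
    (md.contains opponent_id = true ∨ availEmpty = true ∨ od.getD opponent_id [] = [] ∨
      (od.getD opponent_id []).getLast? = some 0)) ∧
  (od.contains opponent_id = false →
    (md.getD opponent_id [] = [] ∧ availEmpty = true))
instance (opponent_id : Int) (my_history : List (Int × List Int)) (opponents_history : List (Int × List Int)) : Decidable (Pre_strategy_round_2 opponent_id my_history opponents_history) := by unfold Pre_strategy_round_2; infer_instance
def pvWitness_strategy_round_2 : Int × (List (Int × List Int)) × (List (Int × List Int)) := (0, [(0, [])], [(0, [])])

def Spec_strategy_round_2 (opponent_id : Int) (my_history : List (Int × List Int)) (opponents_history : List (Int × List Int)) (out : Int × Int) : Prop := out = strategy_round_2_alt opponent_id my_history opponents_history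
instance (opponent_id : Int) (my_history : List (Int × List Int)) (opponents_history : List (Int × List Int)) (out : Int × Int) : Decidable (Spec_strategy_round_2 opponent_id my_history opponents_history out) := by unfold Spec_strategy_round_2; infer_instance

-- ===== CLAIM (what is proved, stated in full; the proofs are below) =====
def Claim_equal_strategy_round_2 : Prop := ∀ (opponent_id : Int) (my_history : List (Int × List Int)) (opponents_history : List (Int × List Int)), Dom_strategy_round_2 opponent_id my_history opponents_history → Pre_strategy_round_2 opponent_id my_history opponents_history → Spec_strategy_round_2 opponent_id my_history opponents_history (strategy_round_2 opponent_id my_history opponents_history)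

-- ===== LEMMAS AND PROOFS =====

-- B's running minimum over a list of ids equals the head of A's stable sort by the same
-- lexicographic key (both keep the FIRST element attaining the minimum).
lemma bestFold_eq_sorted2_head (g : Int → Int) (l : List Int) :
    List.foldl (fun b op =>
      match b with
      | none => some (g op, op)
      | some b0 => if g op < b0.1 ∨ (g op = b0.1 ∧ op < b0.2) then some (g op, op) else some b0)
      none l
    = (PySem.List.sorted2 l g (fun x => x) false).head?.map (fun m => (g m, m)) := by
  induction l using List.reverseRecOn with
  | nil => rfl
  | append_singleton l x ih =>
    rw [List.foldl_append, ih]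
    have hs : PySem.List.sorted2 (l ++ [x]) g (fun x => x) false
        = PySem.List.insertBy
            (fun a b => decide (g a < g b) || (!decide (g b < g a) && decide (a < b))) x
            (PySem.List.sorted2 l g (fun x => x) false) := by
      simp [PySem.List.sorted2, List.foldl_append]
    rw [hs]
    cases h : PySem.List.sorted2 l g (fun x => x) false with
    | nil => simp [PySem.List.insertBy]
    | cons m t =>
      have hb : (decide (g x < g m) || (!decide (g m < g x) && decide (x < m))) =
          decide (g x < g m ∨ (g x = g m ∧ x < m)) := by
        by_cases h1 : g x < g m <;> by_cases h2 : g m < g x <;> by_cases h3 : x < m <;>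
          simp [h1, h2, h3] <;> omega
      by_cases hc : g x < g m ∨ (g x = g m ∧ x < m) <;>
        simp [PySem.List.insertBy, hb, hc]

lemma sorted2_nil_iff (g : Int → Int) (l : List Int) :
    PySem.List.sorted2 l g (fun x => x) false = [] ↔ l = [] := by
  constructor
  · intro h
    have := PySem.List.sorted2_perm (xs := l) (k1 := g) (k2 := fun x => x) (rev := false)
    rw [h] at this
    exact (List.Perm.nil_eq this).symm
  · rintro rfl; rfl

-- ===== VERDICT (by name: the statement is the Claim_ definition above) =====
theorem strategy_round_2_spec : Claim_equal_strategy_round_2 := by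
  intro oid my opp _ hpre
  unfold Spec_strategy_round_2
  obtain ⟨hnd, -, -, -⟩ := hpre
  simp only [strategy_round_2, strategy_round_2_alt]
  have hndk : (PySem.Dict.mk my).keys.Nodup := by simpa [PySem.Dict.keys] using hnd
  have hlen0 : PySem.List.len ((PySem.Dict.mk my).getD oid []) = 0 ↔ (PySem.Dict.mk my).getD oid [] = [] := by
    simp [PySem.List.len_eq, List.length_eq_zero_iff]
  have hitems : my = List.map (fun k => (k, (PySem.Dict.mk my).getD k [])) (PySem.Dict.mk my).keys :=
    PySem.Dict.items_eq_map_keys (PySem.Dict.mk my) hndk ([] : List Int)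
  have h1 := congrArg (List.foldl
      (fun (b : Option (Int × Int)) (p : Int × List Int) =>
        if PySem.List.len p.2 < 200 then
          match b with
          | none => some (PySem.List.len p.2, p.1)
          | some b0 =>
            if PySem.List.len p.2 < b0.1 ∨ (PySem.List.len p.2 = b0.1 ∧ p.1 < b0.2) then
              some (PySem.List.len p.2, p.1)
            else some b0
        else b) none) hitems
  rw [List.foldl_map] at h1
  dsimp only at h1
  rw [PySem.List.foldl_ite_eq_foldl_filter
        (p := fun k => PySem.List.len ((PySem.Dict.mk my).getD k []) < 200)
        (f := fun (b : Option (Int × Int)) (op : Int) => match b with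
          | none => some (PySem.List.len ((PySem.Dict.mk my).getD op []), op)
          | some b0 =>
            if PySem.List.len ((PySem.Dict.mk my).getD op []) < b0.1 ∨
                (PySem.List.len ((PySem.Dict.mk my).getD op []) = b0.1 ∧ op < b0.2) then
              some (PySem.List.len ((PySem.Dict.mk my).getD op []), op)
            else some b0)] at h1
  rw [bestFold_eq_sorted2_head (fun k => PySem.List.len ((PySem.Dict.mk my).getD k []))] at h1
  rw [h1]
  by_cases havail : List.filter (fun op => decide (PySem.List.len ((PySem.Dict.mk my).getD op []) < 200)) (PySem.Dict.mk my).keys = []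
  · rw [havail, if_pos rfl]
    show _ = (if (PySem.Dict.mk my).getD oid [] = [] then (1:Int) else _, oid)
    congr 1
    exact if_congr hlen0 rfl rfl
  · obtain ⟨m, t, hm⟩ : ∃ m t, PySem.List.sorted2
        (List.filter (fun op => decide (PySem.List.len ((PySem.Dict.mk my).getD op []) < 200)) (PySem.Dict.mk my).keys)
        (fun k => PySem.List.len ((PySem.Dict.mk my).getD k [])) (fun x => x) false = m :: t := by
      cases h : PySem.List.sorted2
          (List.filter (fun op => decide (PySem.List.len ((PySem.Dict.mk my).getD op []) < 200)) (PySem.Dict.mk my).keys)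
          (fun k => PySem.List.len ((PySem.Dict.mk my).getD k [])) (fun x => x) false with
      | nil => exact absurd ((sorted2_nil_iff _ _).mp h) havail
      | cons m t => exact ⟨m, t, rfl⟩
    rw [if_neg havail, hm]
    simp only [List.head?_cons, Option.map_some]
    rw [PySem.List.pyGetD_zero_cons]
    by_cases hc : (PySem.Dict.mk opp).getD oid [] ≠ [] ∧
        (PySem.List.pyGetD ((PySem.Dict.mk opp).getD oid []) (-1) 0 = 0 ∨
          200 ≤ PySem.List.len ((PySem.Dict.mk my).getD oid []))
    · rw [if_pos hc, if_pos hc]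
      congr 1
      exact if_congr hlen0 rfl rfl
    · rw [if_neg hc, if_neg hc]
      congr 1
      exact if_congr hlen0 rfl rfl
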